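-- pv_equiv track=rewrite | github.com/netcore-24/2FA-Mikrotik-VPN | backend/services/mikrotik_service.py | _parse_user_output
-- ===== SOURCE A (Python) =====
-- from typing import Optional, List, Dict, Any
--
-- def _parse_user_output(output: str) -> List[Dict[str, Any]]:
--     """Парсинг вывода команды /user print detail (упрощенный вариант)."""
--     # Это упрощенный парсер, в реальности нужен более сложный парсинг
--     users = []
--     lines = output.split('\n')
--     current_user = {}
--
--     for line in lines:
--         line = line.strip()
--         if line.startswith('Flags:'):
--             if current_user:
--                 users.append(current_user)
--                 current_user = {}
--         elif '=' in line:
--             parts = line.split('=', 1)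
--             if len(parts) == 2:
--                 key = parts[0].strip()
--                 value = parts[1].strip()
--                 current_user[key] = value
--
--     if current_user:
--         users.append(current_user)
--
--     return users
-- ===== SOURCE B (Python) =====
-- def _parse_user_output(output):
--     """Group-then-map: partition stripped lines into segments at 'Flags:' lines,
--     then build one dict per segment and keep the non-empty ones."""
--     lines = [ln.strip() for ln in output.split('\n')]
--     segments = []
--     seg = []
--     for ln in lines:
--         if ln.startswith('Flags:'):
--             segments.append(seg)
--             seg = []
--         else:
--             seg.append(ln)
--     segments.append(seg)
--     result = []
--     for sg in segments:
--         d = {p[0].strip(): p[1].strip()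
--              for p in (ln.split('=', 1) for ln in sg) if len(p) == 2}
--         if d:
--             result.append(d)
--     return result
-- ===== Notes on version B (the rewrite author's own statement) =====
-- stated objective: alternative
-- what changed: Replaces A's single stateful loop (mutable current_user dict flushed on 'Flags:' lines) with a two-phase group-then-map pipeline: first partition the stripped lines into 'Flags:'-delimited segments, then build one dict per segment with a dict comprehension and keep the non-empty ones.
import Mathlib
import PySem

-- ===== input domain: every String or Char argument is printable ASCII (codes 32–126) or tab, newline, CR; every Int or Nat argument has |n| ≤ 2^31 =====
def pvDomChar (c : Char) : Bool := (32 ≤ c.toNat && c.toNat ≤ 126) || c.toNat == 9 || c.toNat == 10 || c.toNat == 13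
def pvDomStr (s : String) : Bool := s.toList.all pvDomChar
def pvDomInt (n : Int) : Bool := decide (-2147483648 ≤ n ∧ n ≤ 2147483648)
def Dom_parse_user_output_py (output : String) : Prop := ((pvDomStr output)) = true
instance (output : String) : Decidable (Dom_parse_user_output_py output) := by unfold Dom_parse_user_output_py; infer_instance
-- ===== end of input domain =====

-- B re-groups the lines into 'Flags:'-delimited segments first and then builds one dict per
-- segment (group-then-map decomposition) instead of A's single stateful accumulator loop;
-- objective: alternative (same cost, different decomposition).

-- ===== PORT A =====
-- one iteration of A's for-loop: strip the line, 'Flags:' flushes the current dict, 'k=v' inserts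
def pvAStep (st : List (PySem.Dict String String) × PySem.Dict String String)
    (rawLine : List Char) : List (PySem.Dict String String) × PySem.Dict String String :=
  let line := PySem.Chars.strip rawLine
  if PySem.Chars.startswith line ("Flags:".toList) then
    if st.2.items.isEmpty then st else (st.1 ++ [st.2], PySem.Dict.empty)
  else if PySem.Chars.isIn ['='] line then
    -- line.split('=', 1); the match on [k, v] is Python's 'if len(parts) == 2'
    match PySem.Chars.splitOnMax line ['='] 1 with
    | [k, v] => (st.1, st.2.insert (String.ofList (PySem.Chars.strip k)) (String.ofList (PySem.Chars.strip v)))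
    | _ => st
  else st

def parse_user_output_py (output : String) : List (List (String × String)) :=
  let lines := PySem.Chars.splitOn output.toList ['\n']
  let st := lines.foldl pvAStep ([], PySem.Dict.empty)
  let users := if st.2.items.isEmpty then st.1 else st.1 ++ [st.2]
  users.map PySem.Dict.items

-- ===== PORT B =====
-- the pairs contributed by one segment: the generator '(ln.split('=',1) for ln in sg)' filtered by len == 2
def pvSegPairs (sg : List (List Char)) : List (String × String) :=
  sg.filterMap fun ln =>
    match PySem.Chars.splitOnMax ln ['='] 1 with
    | [k, v] => some (String.ofList (PySem.Chars.strip k), String.ofList (PySem.Chars.strip v))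
    | _ => none

-- the dict comprehension over those pairs (sequential insertion: first position, last value)
def pvDictOf (sg : List (List Char)) : PySem.Dict String String :=
  PySem.Dict.ofList (pvSegPairs sg)

-- one iteration of B's grouping loop: a 'Flags:' line closes the open segment
def pvBStep (p : List (List (List Char)) × List (List Char)) (ln : List Char) :
    List (List (List Char)) × List (List Char) :=
  if PySem.Chars.startswith ln ("Flags:".toList) then (p.1 ++ [p.2], [])
  else (p.1, p.2 ++ [ln])

def parse_user_output_py_alt (output : String) : List (List (String × String)) :=
  let lines := (PySem.Chars.splitOn output.toList ['\n']).map PySem.Chars.strip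
  let p := lines.foldl pvBStep ([], [])
  (p.1 ++ [p.2]).filterMap fun sg =>
    let d := (pvDictOf sg).items
    if d.isEmpty then none else some d

-- ===== PRECONDITION & SPEC =====
def Spec_parse_user_output_py (output : String) (out : List (List (String × String))) : Prop := out = parse_user_output_py_alt output
instance (output : String) (out : List (List (String × String))) : Decidable (Spec_parse_user_output_py output out) := by unfold Spec_parse_user_output_py; infer_instance

-- ===== CLAIM (what is proved, stated in full; the proofs are below) =====
def Claim_equal_parse_user_output_py : Prop := ∀ (output : String), Dom_parse_user_output_py output → Spec_parse_user_output_py output (parse_user_output_py output)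

-- ===== LEMMAS AND PROOFS =====

-- A's final flush and result list
def pvAFin (st : List (PySem.Dict String String) × PySem.Dict String String) :
    List (List (String × String)) :=
  (if st.2.items.isEmpty then st.1 else st.1 ++ [st.2]).map PySem.Dict.items

-- B's final pass over the segments
def pvBFin (p : List (List (List Char)) × List (List Char)) : List (List (String × String)) :=
  (p.1 ++ [p.2]).filterMap fun sg =>
    let d := (pvDictOf sg).items
    if d.isEmpty then none else some d

-- split(sep, 1) never finds the separator when 'sep in line' is false: the whole line comes back
lemma pvGo_no_sep (fuel : Nat) : ∀ (m : Nat) (l cur : List Char) (acc : List (List Char)),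
    l.length < fuel → '=' ∉ l →
    PySem.Chars.splitOnMax.go ['='] fuel m l cur acc = ((cur.reverse ++ l) :: acc).reverse := by
  induction fuel with
  | zero => intro m l cur acc h _; exact absurd h (by omega)
  | succ fuel ih =>
    intro m l cur acc h hm
    rw [PySem.Chars.splitOnMax.go.eq_def]
    cases l with
    | nil => simp
    | cons c rest =>
      have hc : c ≠ '=' := fun hc => hm (hc ▸ List.mem_cons_self)
      have hpre : ((['='] : List Char).isPrefixOf (c :: rest)) = false := by
        simp [List.isPrefixOf]
        exact fun hcc => absurd hcc.symm hc
      by_cases hm0 : m = 0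
      · simp [hm0]
      · simp only [hm0, if_false, hpre, Bool.false_eq_true]
        rw [ih m rest (c :: cur) acc (by simpa using Nat.lt_of_succ_lt_succ h)
            (fun hmem => hm (List.mem_cons_of_mem _ hmem))]
        simp

lemma pvSplit_no_eq (ln : List Char) (h : PySem.Chars.isIn ['='] ln = false) :
    PySem.Chars.splitOnMax ln ['='] 1 = [ln] := by
  rw [PySem.Chars.isIn_eq_false_iff] at h
  have hmem : '=' ∉ ln := by
    intro hm
    obtain ⟨s, t, rfl⟩ := List.append_of_mem hm
    exact h ⟨s, t, by simp⟩
  rw [PySem.Chars.splitOnMax]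
  rw [if_neg (by omega)]
  rw [pvGo_no_sep (ln.length + 1) (Int.toNat 1) ln [] [] (by omega) hmem]
  simp

lemma pvOfList_append (ps : List (String × String)) (q : String × String) :
    PySem.Dict.ofList (ps ++ [q]) = (PySem.Dict.ofList ps).insert q.1 q.2 := by
  simp [PySem.Dict.ofList, PySem.Dict.update, List.foldl_append]

lemma pvDictOf_nil : pvDictOf [] = PySem.Dict.empty := rfl

lemma pvDict_eq_empty {d : PySem.Dict String String} (h : d.items = []) :
    d = PySem.Dict.empty := by
  apply PySem.Dict.ext
  simp [h, PySem.Dict.empty]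

-- the grouping fold only appends to the segment list: the accumulator factors out
lemma pvBStep_acc (L : List (List Char)) : ∀ (segs : List (List (List Char))) (seg : List (List Char)),
    L.foldl pvBStep (segs, seg) =
      (segs ++ (L.foldl pvBStep ([], seg)).1, (L.foldl pvBStep ([], seg)).2) := by
  induction L with
  | nil => intro segs seg; simp
  | cons ln L ih =>
    intro segs seg
    simp only [List.foldl_cons, pvBStep]
    by_cases h : PySem.Chars.startswith ln ("Flags:".toList) = true
    · simp only [h, if_true, List.nil_append]
      rw [ih (segs ++ [seg]) [], ih [seg] []]
      simp
    · simp only [h, Bool.false_eq_true, if_false]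
      exact ih segs (seg ++ [ln])

-- main invariant: A's accumulator run equals B's grouped run, for any flushed users and open segment
lemma pvMain (L : List (List Char)) : ∀ (users : List (PySem.Dict String String)) (seg : List (List Char)),
    pvAFin (L.foldl pvAStep (users, pvDictOf seg)) =
      users.map PySem.Dict.items ++ pvBFin ((L.map PySem.Chars.strip).foldl pvBStep ([], seg)) := by
  induction L with
  | nil =>
    intro users seg
    by_cases he : (pvDictOf seg).items = []
    · simp [pvAFin, pvBFin, he]
    · simp [pvAFin, pvBFin, he]
  | cons raw L ih =>
    intro users seg
    simp only [List.foldl_cons, List.map_cons]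
    by_cases hf : PySem.Chars.startswith (PySem.Chars.strip raw) ['F','l','a','g','s',':'] = true
    · have hb : pvBStep ([], seg) (PySem.Chars.strip raw) = ([seg], []) := by
        simp [pvBStep, hf]
      rw [hb, pvBStep_acc _ [seg] []]
      by_cases he : (pvDictOf seg).items = []
      · have hstep : pvAStep (users, pvDictOf seg) raw = (users, pvDictOf []) := by
          have h2 : pvDictOf seg = pvDictOf [] := by rw [pvDict_eq_empty he]; rfl
          simp [pvAStep, hf, h2, pvDictOf_nil, PySem.Dict.empty]
        rw [hstep, ih users []]
        simp [pvBFin, he]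
      · have hstep : pvAStep (users, pvDictOf seg) raw
            = (users ++ [pvDictOf seg], pvDictOf []) := by
          simp [pvAStep, hf, he, pvDictOf_nil]
        rw [hstep, ih (users ++ [pvDictOf seg]) []]
        simp [pvBFin, he]
    · have hb : pvBStep ([], seg) (PySem.Chars.strip raw)
          = ([], seg ++ [PySem.Chars.strip raw]) := by
        simp [pvBStep, hf]
      have hstep : pvAStep (users, pvDictOf seg) raw
          = (users, pvDictOf (seg ++ [PySem.Chars.strip raw])) := by
        by_cases hin : PySem.Chars.isIn ['='] (PySem.Chars.strip raw) = true
        · rcases hsp : PySem.Chars.splitOnMax (PySem.Chars.strip raw) ['='] 1 with _ | ⟨k, t⟩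
          · simp [pvAStep, hf, hin, hsp, pvDictOf, pvSegPairs, List.filterMap_append]
          · rcases t with _ | ⟨v, t2⟩
            · simp [pvAStep, hf, hin, hsp, pvDictOf, pvSegPairs, List.filterMap_append]
            · rcases t2 with _ | ⟨w, t3⟩
              · simp [pvAStep, hf, hin, hsp, pvDictOf, pvSegPairs, List.filterMap_append,
                  pvOfList_append]
              · simp [pvAStep, hf, hin, hsp, pvDictOf, pvSegPairs, List.filterMap_append]
        · have hsp := pvSplit_no_eq (PySem.Chars.strip raw) (by simpa using hin)
          simp [pvAStep, hf, hin, hsp, pvDictOf, pvSegPairs, List.filterMap_append]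
      rw [hb, hstep]
      exact ih users (seg ++ [PySem.Chars.strip raw])

-- ===== VERDICT (by name: the statement is the Claim_ definition above) =====
theorem parse_user_output_py_spec : Claim_equal_parse_user_output_py := by
  intro output _
  unfold Spec_parse_user_output_py
  show parse_user_output_py output = parse_user_output_py_alt output
  unfold parse_user_output_py parse_user_output_py_alt
  have h0 : (PySem.Dict.empty : PySem.Dict String String) = pvDictOf [] := rfl
  rw [h0]
  exact pvMain (PySem.Chars.splitOn output.toList ['\n']) [] []
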